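-- pv_equiv track=rewrite | github.com/kiyashahidi9/py_110 | small_problems/easy5/pp8.py | staggered_case
-- ===== SOURCE A (Python) =====
-- def find_previous_char_idx(string_list, current_char_idx):
--     for idx in range(current_char_idx - 1, -1, -1):
--         if string_list[idx].isalpha():
--             return idx
--
-- def staggered_case(string):
--     string_list = list(string.capitalize())
--
--     for idx in range(1, len(string_list)):
--
--         previous_char_idx = find_previous_char_idx(string_list, idx)
--
--         if string_list[previous_char_idx].isupper():
--             string_list[idx] = string_list[idx].lower()
--         else:
--             string_list[idx] = string_list[idx].upper()
--
--     return ''.join(string_list)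
-- ===== SOURCE B (Python) =====
-- def staggered_case(string):
--     result = []
--     prev_is_upper = None  # case of the last alphabetic character emitted so far
--     for ch in string.capitalize():
--         if prev_is_upper is None:
--             new = ch
--         elif prev_is_upper:
--             new = ch.lower()
--         else:
--             new = ch.upper()
--         result.append(new)
--         if new.isalpha():
--             prev_is_upper = new.isupper()
--     return ''.join(result)
-- ===== Notes on version B (the rewrite author's own statement) =====
-- stated objective: faster
-- what changed: B replaces A's per-index backward rescan for the previous alphabetic character by a single forward pass that carries the case of the last alphabetic character emitted.
import Mathlib
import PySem

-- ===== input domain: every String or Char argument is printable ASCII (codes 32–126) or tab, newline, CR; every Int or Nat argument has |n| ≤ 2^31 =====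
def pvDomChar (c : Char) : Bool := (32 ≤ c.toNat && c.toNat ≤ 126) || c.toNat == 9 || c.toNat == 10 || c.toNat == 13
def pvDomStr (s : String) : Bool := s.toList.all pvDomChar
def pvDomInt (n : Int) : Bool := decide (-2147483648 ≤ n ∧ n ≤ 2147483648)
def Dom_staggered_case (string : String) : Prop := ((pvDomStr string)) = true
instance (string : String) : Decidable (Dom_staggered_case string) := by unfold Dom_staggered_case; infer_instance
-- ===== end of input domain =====

-- B replaces A's quadratic "re-scan backwards for the previous alphabetic char at every index"
-- by one forward pass that carries the case of the last alphabetic char emitted (objective: faster).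

-- str.capitalize(): first char uppercased, rest lowercased — exact on the ASCII domain
-- (Python title-cases the first char, which coincides with upper() for ASCII); used by both ports.
def pyCapitalize (cs : List Char) : List Char :=
  match cs with
  | [] => []
  | c :: rest => PySem.Chars.upperChar c :: PySem.Chars.lower rest

-- ===== PORT A =====
-- the 'for idx in range(...)' of find_previous_char_idx, as recursion over the range list
def find_previous_char_idx (l : List Char) : List Int → Option Int
  | [] => none
  | i :: rest =>
    match PySem.List.pyGet? l i with
    | none => none  -- IndexError; never hit: the range only produces in-range indices
    | some c => if PySem.Chars.isalpha c then some i else find_previous_char_idx l rest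

-- body of A's main loop
def stepA (l : List Char) (idx : Int) : List Char :=
  match find_previous_char_idx l (PySem.List.pyRange (idx - 1) (-1) (-1)) with
  | none => l  -- Python raises TypeError here (indexing with None); such inputs are outside Pre_
  | some p =>
    match PySem.List.pyGet? l p, PySem.List.pyGet? l idx with
    | some cp, some ci =>
      if PySem.Chars.isupper cp then PySem.List.pySetD l idx (PySem.Chars.lowerChar ci)
      else PySem.List.pySetD l idx (PySem.Chars.upperChar ci)
    | _, _ => l  -- unreachable: both indices are in range

def staggered_case (string : String) : String :=
  let string_list := pyCapitalize string.toList
  String.ofList ((PySem.List.pyRange 1 (string_list.length : Int) 1).foldl stepA string_list)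

-- ===== PORT B =====
-- B's if/elif/else choosing the new char from the carried case of the last alphabetic char
def caseOf (prev : Option Bool) (c : Char) : Char :=
  match prev with
  | none => c
  | some true => PySem.Chars.lowerChar c
  | some false => PySem.Chars.upperChar c

-- B's single forward loop: prev = case of the last alphabetic char emitted (none before the first)
def altGo (prev : Option Bool) : List Char → List Char
  | [] => []
  | c :: rest =>
    let new := caseOf prev c
    new :: altGo (if PySem.Chars.isalpha new then some (PySem.Chars.isupper new) else prev) rest

def staggered_case_alt (string : String) : String :=
  String.ofList (altGo none (pyCapitalize string.toList))

-- ===== PRECONDITION & SPEC =====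
-- Pre_ excludes exactly the inputs where A raises TypeError (length ≥ 2 with a non-alphabetic
-- first character: find_previous_char_idx returns None and A indexes the list with it).
def Pre_staggered_case (string : String) : Prop :=
  string.toList.length ≤ 1 ∨ PySem.Chars.isalpha (string.toList.headD ' ') = true
instance (string : String) : Decidable (Pre_staggered_case string) := by
  unfold Pre_staggered_case; infer_instance

def pvWitness_staggered_case : String := "ab"

def Spec_staggered_case (string : String) (out : String) : Prop := out = staggered_case_alt string
instance (string : String) (out : String) : Decidable (Spec_staggered_case string out) := by
  unfold Spec_staggered_case; infer_instance

-- ===== CLAIM (what is proved, stated in full; the proofs are below) =====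
def Claim_equal_staggered_case : Prop := ∀ (string : String), Dom_staggered_case string → Pre_staggered_case string → Spec_staggered_case string (staggered_case string)

-- ===== LEMMAS AND PROOFS =====

-- the last alphabetic char of a processed prefix (B's loop state is its case)
def lastAlphaC (p : List Char) : Option Char :=
  p.foldl (fun acc c => if PySem.Chars.isalpha c then some c else acc) none

lemma lastAlphaC_append (p : List Char) (c : Char) :
    lastAlphaC (p ++ [c]) = if PySem.Chars.isalpha c then some c else lastAlphaC p := by
  simp [lastAlphaC, List.foldl_append]

lemma pyRange_negstep_nil :
    PySem.List.pyRange (-1) (-1) (-1) = [] := by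
  rfl

lemma pyRange_negstep_cons (a : Int) (h : 0 ≤ a) :
    PySem.List.pyRange a (-1) (-1) = a :: PySem.List.pyRange (a - 1) (-1) (-1) := by
  unfold PySem.List.pyRange
  have h1 : (-1 : Int) < a := by omega
  norm_num [h1]
  have hn : (a + 1).toNat = a.toNat + 1 := by omega
  rw [hn, List.range_succ_eq_map, List.map_cons, List.map_map]
  congr 1
  · norm_num
  · by_cases h0 : (0 : Int) < a
    · rw [if_pos h0]
      apply List.map_congr_left
      intro k _
      simp only [Function.comp_apply]
      push_cast
      ring
    · have ha0 : a = 0 := by omega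
      subst ha0
      simp

lemma findPrev_some (l : List Char) (idxs : List Int) (p : Int)
    (h : find_previous_char_idx l idxs = some p) :
    ∃ c, PySem.List.pyGet? l p = some c ∧ PySem.Chars.isalpha c = true := by
  induction idxs with
  | nil => simp [find_previous_char_idx] at h
  | cons i rest ih =>
    unfold find_previous_char_idx at h
    cases hg : PySem.List.pyGet? l i with
    | none => rw [hg] at h; exact absurd h (by simp)
    | some c =>
      rw [hg] at h
      by_cases ha : PySem.Chars.isalpha c = true
      · simp [ha] at h; exact ⟨c, h ▸ hg, ha⟩
      · simp [ha] at h; exact ih h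

lemma findPrev_take (l : List Char) : ∀ (k : Nat), k ≤ l.length →
    (find_previous_char_idx l (PySem.List.pyRange ((k : Int) - 1) (-1) (-1))).bind
      (PySem.List.pyGet? l) = lastAlphaC (l.take k) := by
  intro k
  induction k with
  | zero =>
    intro _
    norm_num [pyRange_negstep_nil, find_previous_char_idx, lastAlphaC]
  | succ k ih =>
    intro hk
    have hlt : k < l.length := by omega
    have hcast : ((k + 1 : Nat) : Int) - 1 = (k : Int) := by push_cast; ring
    rw [hcast, pyRange_negstep_cons _ (by positivity)]
    unfold find_previous_char_idx
    have hg : PySem.List.pyGet? l (k : Int) = some l[k] := by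
      simp [PySem.List.pyGet?_natCast, List.getElem?_eq_getElem hlt]
    rw [hg]
    have htake : l.take (k + 1) = l.take k ++ [l[k]] := by
      rw [List.take_add_one]
      simp [List.getElem?_eq_getElem hlt]
    rw [htake, lastAlphaC_append]
    by_cases ha : PySem.Chars.isalpha l[k] = true
    · simp [ha, hg]
    · rw [Bool.not_eq_true] at ha
      simp only [ha, Bool.false_eq_true, if_false]
      exact ih (by omega)

lemma set_len_append (pre : List Char) (x c : Char) (suf : List Char) :
    (pre ++ c :: suf).set pre.length x = pre ++ x :: suf := by
  induction pre with
  | nil => rfl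
  | cons a t ih => simp [ih]

lemma stepA_decomp (pre : List Char) (c : Char) (suf : List Char) :
    stepA (pre ++ c :: suf) (pre.length : Int)
      = pre ++ caseOf ((lastAlphaC pre).map PySem.Chars.isupper) c :: suf := by
  have hlen : pre.length ≤ (pre ++ c :: suf).length := by simp
  have G := findPrev_take (pre ++ c :: suf) pre.length hlen
  rw [List.take_left] at G
  unfold stepA
  cases hfp : find_previous_char_idx (pre ++ c :: suf)
      (PySem.List.pyRange ((pre.length : Int) - 1) (-1) (-1)) with
  | none =>
    rw [hfp] at G
    simp only [Option.bind_none] at G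
    rw [← G]
    rfl
  | some p =>
    obtain ⟨cp, hget, halpha⟩ := findPrev_some _ _ _ hfp
    rw [hfp] at G
    simp only [Option.bind_some] at G
    rw [hget] at G
    dsimp only
    rw [hget]
    have hgi : PySem.List.pyGet? (pre ++ c :: suf) (pre.length : Int) = some c := by
      simp
    rw [hgi]
    rw [← G]
    have hset : ∀ x, PySem.List.pySetD (pre ++ c :: suf) (pre.length : Int) x = pre ++ x :: suf := by
      intro x
      rw [PySem.List.pySetD_natCast]
      exact set_len_append pre x c suf
    by_cases hu : PySem.Chars.isupper cp = true <;> simp [hu, hset, caseOf]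

lemma loop_eq : ∀ (suf pre : List Char),
    (PySem.List.pyRange (pre.length : Int) ((pre.length + suf.length : Nat) : Int) 1).foldl
      stepA (pre ++ suf)
      = pre ++ altGo ((lastAlphaC pre).map PySem.Chars.isupper) suf := by
  intro suf
  induction suf with
  | nil =>
    intro pre
    have hr : PySem.List.pyRange (pre.length : Int) ((pre.length + 0 : Nat) : Int) 1 = [] := by
      unfold PySem.List.pyRange
      norm_num
    simp only [List.length_nil] at *
    rw [hr]
    simp [altGo]
  | cons c rest ih =>
    intro pre
    have hab : (pre.length : Int) < ((pre.length + (c :: rest).length : Nat) : Int) := by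
      simp only [List.length_cons]
      push_cast
      omega
    rw [PySem.List.pyRange_one_cons hab, List.foldl_cons, stepA_decomp]
    have h1 : pre ++ caseOf ((lastAlphaC pre).map PySem.Chars.isupper) c :: rest
        = (pre ++ [caseOf ((lastAlphaC pre).map PySem.Chars.isupper) c]) ++ rest := by simp
    have h2 : ((pre.length : Int) + 1)
        = ((pre ++ [caseOf ((lastAlphaC pre).map PySem.Chars.isupper) c]).length : Int) := by
      simp only [List.length_append, List.length_cons, List.length_nil]
      push_cast
      ring
    have h3 : ((pre.length + (c :: rest).length : Nat) : Int)
        = (((pre ++ [caseOf ((lastAlphaC pre).map PySem.Chars.isupper) c]).length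
            + rest.length : Nat) : Int) := by
      simp only [List.length_append, List.length_cons, List.length_nil]
      push_cast
      ring
    rw [h1, h2, h3, ih]
    simp only [altGo, List.append_assoc, List.singleton_append]
    rw [lastAlphaC_append]
    by_cases ha : PySem.Chars.isalpha (caseOf ((lastAlphaC pre).map PySem.Chars.isupper) c) = true
      <;> simp [ha]

lemma top_eq (cs : List Char) :
    (PySem.List.pyRange 1 (cs.length : Int) 1).foldl stepA cs = altGo none cs := by
  cases cs with
  | nil => rfl
  | cons c rest =>
    have h := loop_eq rest [c]
    simp only [List.length_singleton, List.singleton_append, Nat.cast_one] at h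
    have hlen : ((1 + rest.length : Nat) : Int) = ((c :: rest).length : Int) := by
      simp only [List.length_cons]
      push_cast
      ring
    rw [hlen] at h
    rw [h]
    have : altGo none (c :: rest)
        = c :: altGo ((lastAlphaC [c]).map PySem.Chars.isupper) rest := by
      simp only [altGo, lastAlphaC, List.foldl, caseOf]
      by_cases ha : PySem.Chars.isalpha c = true <;> simp [ha]
    rw [this]

-- ===== VERDICT (by name: the statement is the Claim_ definition above) =====
theorem staggered_case_spec : Claim_equal_staggered_case := by
  intro s _ _
  show String.ofList _ = String.ofList _
  rw [top_eq]
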